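-- pv_equiv track=rewrite | github.com/taylor1355/project-euler | 34.py | facorial_digit_sum
-- ===== SOURCE A (Python) =====
-- def facorial_digit_sum(digit_counts):
--     factorial = 1
--     sum = 0
--     for i in range(len(digit_counts)):
--         if i > 0:
--             factorial *= i
--         sum += digit_counts[i] * factorial
--     return sum
-- ===== SOURCE B (Python) =====
-- import math
--
--
-- def facorial_digit_sum(digit_counts):
--     # Idiomatic form: each term's factorial is computed directly from its
--     # index via math.factorial; no running-product state is threaded.
--     return sum(c * math.factorial(i) for i, c in enumerate(digit_counts))
-- ===== Notes on version B (the rewrite author's own statement) =====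
-- stated objective: idiomatic
-- what changed: Replaced the loop that threads a running factorial accumulator and running sum with a one-line sum over enumerate computing each i! independently via math.factorial.
import Mathlib
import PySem

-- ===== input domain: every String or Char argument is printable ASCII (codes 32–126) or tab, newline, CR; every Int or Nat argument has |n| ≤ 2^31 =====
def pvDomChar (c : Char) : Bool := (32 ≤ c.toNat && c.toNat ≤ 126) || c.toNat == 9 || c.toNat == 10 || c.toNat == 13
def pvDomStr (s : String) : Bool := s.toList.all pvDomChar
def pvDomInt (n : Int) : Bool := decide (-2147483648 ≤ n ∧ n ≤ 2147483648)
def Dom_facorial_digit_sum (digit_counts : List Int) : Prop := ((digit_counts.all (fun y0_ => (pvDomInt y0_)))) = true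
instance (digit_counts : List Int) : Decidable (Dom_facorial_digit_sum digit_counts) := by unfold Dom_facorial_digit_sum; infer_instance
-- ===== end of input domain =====

-- B replaces A's running-factorial accumulator loop with an idiomatic sum over
-- enumerate, computing each i! directly (objective: idiomatic; not faster).

-- ===== PORT A =====
-- A: for i in range(len(xs)): if i>0: factorial *= i; sum += xs[i]*factorial
def facorial_digit_sum (digit_counts : List Int) : Int :=
  (PySem.List.pyRange 0 digit_counts.length 1).foldl
    (fun (st : Int × Int) i =>
      let factorial := if i > 0 then st.1 * i else st.1
      (factorial, st.2 + PySem.List.pyGetD digit_counts i 0 * factorial))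
    (1, 0) |>.2

-- ===== PORT B =====
-- B: sum(c * math.factorial(i) for i, c in enumerate(digit_counts))
def facorial_digit_sum_alt (digit_counts : List Int) : Int :=
  ((PySem.List.enumerate digit_counts 0).map
    (fun p => p.2 * (Nat.factorial p.1.toNat : Int))).sum

-- ===== PRECONDITION & SPEC =====
def Spec_facorial_digit_sum (digit_counts : List Int) (out : Int) : Prop := out = facorial_digit_sum_alt digit_counts
instance (digit_counts : List Int) (out : Int) : Decidable (Spec_facorial_digit_sum digit_counts out) := by unfold Spec_facorial_digit_sum; infer_instance

-- ===== CLAIM (what is proved, stated in full; the proofs are below) =====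
def Claim_equal_facorial_digit_sum : Prop := ∀ (digit_counts : List Int), Dom_facorial_digit_sum digit_counts → Spec_facorial_digit_sum digit_counts (facorial_digit_sum digit_counts)

-- ===== LEMMAS AND PROOFS =====

-- B on xs ++ [x] appends one term x * n!
theorem alt_append (xs : List Int) (x : Int) :
    facorial_digit_sum_alt (xs ++ [x])
      = facorial_digit_sum_alt xs + x * (Nat.factorial xs.length : Int) := by
  simp [facorial_digit_sum_alt, PySem.List.enumerate_append,
        PySem.List.enumerate_cons]

-- invariant: A's fold over range(n) ends in state ((n-1)!, B's sum of first n terms)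
theorem foldA_state (xs : List Int) :
    (PySem.List.pyRange 0 xs.length 1).foldl
      (fun (st : Int × Int) i =>
        let factorial := if i > 0 then st.1 * i else st.1
        (factorial, st.2 + PySem.List.pyGetD xs i 0 * factorial))
      (1, 0)
    = ((Nat.factorial (xs.length - 1) : Int), facorial_digit_sum_alt xs) := by
  induction xs using List.reverseRecOn with
  | nil => simp [facorial_digit_sum_alt, PySem.List.pyRange_one_eq_nil]
  | append_singleton xs x ih =>
    have hlen : ((xs ++ [x]).length : Int) = (xs.length : Int) + 1 := by
      simp
    rw [hlen, PySem.List.pyRange_one_succ_right (by positivity)]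
    rw [List.foldl_append]
    have hcongr :
        (PySem.List.pyRange 0 xs.length 1).foldl
          (fun (st : Int × Int) i =>
            let factorial := if i > 0 then st.1 * i else st.1
            (factorial, st.2 + PySem.List.pyGetD (xs ++ [x]) i 0 * factorial))
          (1, 0)
        = (PySem.List.pyRange 0 xs.length 1).foldl
          (fun (st : Int × Int) i =>
            let factorial := if i > 0 then st.1 * i else st.1
            (factorial, st.2 + PySem.List.pyGetD xs i 0 * factorial))
          (1, 0) := by
      apply PySem.List.foldl_congr_mem
      intro st i hi
      have hmem := (PySem.List.mem_pyRange_one).mp hi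
      have h0 : (0:Int) ≤ i := hmem.1
      have h1 : i < (xs.length : Int) := hmem.2
      have : PySem.List.pyGetD (xs ++ [x]) i 0 = PySem.List.pyGetD xs i 0 := by
        have h1' : i < ((xs ++ [x]).length : Int) := by simp; omega
        rw [PySem.List.pyGetD_eq_getElem _ _ h0 h1',
            PySem.List.pyGetD_eq_getElem _ _ h0 h1]
        have hb : i.toNat < xs.length := by omega
        simp [List.getElem_append_left hb]
      simp only [this]
    rw [hcongr, ih]
    have hx : PySem.List.pyGetD (xs ++ [x]) (xs.length : Int) 0 = x := by
      rw [PySem.List.pyGetD_eq_getElem _ _ (by positivity) (by simp)]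
      simp
    rw [alt_append]
    simp only [List.foldl_cons, List.foldl_nil, hx]
    rcases Nat.eq_zero_or_pos xs.length with h | h
    · simp [h]
    · have hpos : (0:Int) < (xs.length : Int) := by exact_mod_cast h
      have hfact : ((Nat.factorial (xs.length - 1) : Int)) * (xs.length : Int)
          = (Nat.factorial ((xs ++ [x]).length - 1) : Int) := by
        have : (xs ++ [x]).length - 1 = xs.length := by simp
        rw [this]
        have hsucc : xs.length = (xs.length - 1) + 1 := by omega
        rw [hsucc, Nat.factorial_succ]
        push_cast
        ring_nf
      simp only [if_pos hpos, hfact]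
      have hl : (xs ++ [x]).length - 1 = xs.length := by simp
      rw [hl]

-- ===== VERDICT (by name: the statement is the Claim_ definition above) =====
theorem facorial_digit_sum_spec : Claim_equal_facorial_digit_sum := by
  intro xs _
  unfold Spec_facorial_digit_sum facorial_digit_sum
  rw [foldA_state]
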